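-- pv_equiv track=rewrite | github.com/mkjubran/x265LC | make_video_training_profile.py | predictors_ip_gop
-- ===== SOURCE A (Python) =====
-- def predictors_ip_gop(frame_type, gop_length):
--    last_i_frame = 0
--    frame_predictors = []
--    for i in range(len(frame_type)):
--       if frame_type[i] == 'I':
--          frame_predictors.append([])
--          last_i_frame = i
--
--       if frame_type[i] == 'P':
--          frame_predictors.append(range(last_i_frame, last_i_frame + gop_length))
--
--    return frame_predictors
-- ===== SOURCE B (Python) =====
-- def predictors_ip_gop(frame_type, gop_length):
--     # Index structure: positions of all 'I' frames, built once.
--     i_pos = [i for i, t in enumerate(frame_type) if t == 'I']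
--
--     def prev_i(i):
--         # predecessor lookup: last I-frame position <= i, default 0
--         best = 0
--         for j in i_pos:
--             if j <= i:
--                 best = j
--         return best
--
--     out = []
--     for i, t in enumerate(frame_type):
--         if t == 'I':
--             out.append([])
--         elif t == 'P':
--             b = prev_i(i)
--             out.append(range(b, b + gop_length))
--     return out
-- ===== Notes on version B (the rewrite author's own statement) =====
-- stated objective: alternative
-- what changed: Replaces A's single fused scan carrying a running last-I accumulator with an index structure: the list of I-frame positions is built once, and each P frame does a predecessor lookup (last I position <= i, default 0) in that index.
import Mathlib
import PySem

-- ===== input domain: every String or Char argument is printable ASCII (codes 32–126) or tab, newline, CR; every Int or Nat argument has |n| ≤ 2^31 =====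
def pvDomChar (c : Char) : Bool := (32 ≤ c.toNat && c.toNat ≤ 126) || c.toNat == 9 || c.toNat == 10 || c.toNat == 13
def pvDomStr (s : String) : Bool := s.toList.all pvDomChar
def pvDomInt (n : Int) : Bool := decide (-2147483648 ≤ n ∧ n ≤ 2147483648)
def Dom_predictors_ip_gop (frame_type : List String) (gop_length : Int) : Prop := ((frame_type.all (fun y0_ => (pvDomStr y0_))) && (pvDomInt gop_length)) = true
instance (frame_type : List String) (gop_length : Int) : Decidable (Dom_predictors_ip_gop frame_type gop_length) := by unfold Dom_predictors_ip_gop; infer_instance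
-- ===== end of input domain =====

-- B replaces A's running last-I accumulator with an I-position index built once plus a predecessor lookup per P frame (alternative algorithm, not faster).

-- ===== PORT A =====
-- single loop over the frame indices carrying (last_i_frame, frame_predictors)
def predictors_ip_gop (frame_type : List String) (gop_length : Int) : List (List Int) :=
  let st := (PySem.List.enumerate frame_type 0).foldl
    (fun (st : Int × List (List Int)) p =>
      let st1 : Int × List (List Int) :=
        if p.2 == "I" then (p.1, st.2 ++ [[]]) else st
      if p.2 == "P" then
        (st1.1, st1.2 ++ [PySem.List.pyRange st1.1 (st1.1 + gop_length) 1])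
      else st1)
    (0, [])
  st.2

-- ===== PORT B =====
-- helper prev_i: last element of the index ≤ i, default 0 (linear scan keeping the latest match)
def pvPrevI (iPos : List Int) (i : Int) : Int :=
  iPos.foldl (fun best j => if j ≤ i then j else best) 0

-- index of I-frame positions built once, then per-frame emission with a predecessor lookup for P frames
def predictors_ip_gop_alt (frame_type : List String) (gop_length : Int) : List (List Int) :=
  let iPos := (PySem.List.enumerate frame_type 0).filterMap
    (fun p => if p.2 == "I" then some p.1 else none)
  (PySem.List.enumerate frame_type 0).filterMap (fun p =>
    if p.2 == "I" then some []
    else if p.2 == "P" then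
      let b := pvPrevI iPos p.1
      some (PySem.List.pyRange b (b + gop_length) 1)
    else none)

-- ===== PRECONDITION & SPEC =====
def Spec_predictors_ip_gop (frame_type : List String) (gop_length : Int) (out : List (List Int)) : Prop := out = predictors_ip_gop_alt frame_type gop_length
instance (frame_type : List String) (gop_length : Int) (out : List (List Int)) : Decidable (Spec_predictors_ip_gop frame_type gop_length out) := by unfold Spec_predictors_ip_gop; infer_instance

-- ===== CLAIM (what is proved, stated in full; the proofs are below) =====
def Claim_equal_predictors_ip_gop : Prop := ∀ (frame_type : List String) (gop_length : Int), Dom_predictors_ip_gop frame_type gop_length → Spec_predictors_ip_gop frame_type gop_length (predictors_ip_gop frame_type gop_length)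

-- ===== LEMMAS AND PROOFS =====

-- reference recursion: what A's fused loop emits, starting at index i with last-I index c
def pvOut (g : Int) : List String → Int → Int → List (List Int)
  | [], _, _ => []
  | t :: ts, i, c =>
    let c' := if t == "I" then i else c
    (if t == "I" then [[]]
     else if t == "P" then [PySem.List.pyRange c' (c' + g) 1]
     else []) ++ pvOut g ts (i + 1) c'

-- reference recursion: the I-position index, starting at index i
def pvIpos : List String → Int → List Int
  | [], _ => []
  | t :: ts, i => (if t == "I" then [i] else []) ++ pvIpos ts (i + 1)

theorem pvA_fold (g : Int) (ts : List String) : ∀ (i c : Int) (acc : List (List Int)),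
    ((PySem.List.enumerate ts i).foldl
      (fun (st : Int × List (List Int)) p =>
        let st1 : Int × List (List Int) :=
          if p.2 == "I" then (p.1, st.2 ++ [[]]) else st
        if p.2 == "P" then
          (st1.1, st1.2 ++ [PySem.List.pyRange st1.1 (st1.1 + g) 1])
        else st1)
      (c, acc)).2 = acc ++ pvOut g ts i c := by
  induction ts with
  | nil => intro i c acc; simp [PySem.List.enumerate_nil, pvOut]
  | cons t ts ih =>
    intro i c acc
    rw [PySem.List.enumerate_cons, List.foldl_cons, ih]
    by_cases hI : t == "I"
    · have hP : (t == "P") = false := by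
        have := eq_of_beq hI; subst this; decide
      simp [pvOut, hI, hP]
    · by_cases hP : t == "P"
      · simp [pvOut, hI, hP]
      · simp [pvOut, hI, hP]

theorem pvIpos_eq (ts : List String) : ∀ (i : Int),
    (PySem.List.enumerate ts i).filterMap
      (fun p => if p.2 == "I" then some p.1 else none) = pvIpos ts i := by
  induction ts with
  | nil => intro i; simp [PySem.List.enumerate_nil, pvIpos]
  | cons t ts ih =>
    intro i
    rw [PySem.List.enumerate_cons, List.filterMap_cons]
    by_cases hI : t == "I" <;> simp only [pvIpos, hI, if_true, if_false, ih (i + 1),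
      List.singleton_append, List.nil_append] <;> simp

theorem pvIpos_ge (ts : List String) : ∀ (i : Int), ∀ j ∈ pvIpos ts i, i ≤ j := by
  induction ts with
  | nil => intro i j hj; simp [pvIpos] at hj
  | cons t ts ih =>
    intro i j hj
    by_cases hI : t == "I" <;> simp [pvIpos, hI] at hj
    · rcases hj with h | h
      · omega
      · have := ih (i + 1) j h; omega
    · have := ih (i + 1) j hj; omega

-- the lookup over a list whose elements all exceed the query is the identity fold
theorem pvPrevI_skip (i : Int) (a : List Int) (h : ∀ j ∈ a, i < j) : ∀ (b : Int),
    a.foldl (fun best j => if j ≤ i then j else best) b = b := by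
  induction a with
  | nil => intro b; simp
  | cons x xs ih =>
    intro b
    have hx : ¬ x ≤ i := by have := h x (by simp); omega
    rw [List.foldl_cons, if_neg hx]
    exact ih (fun j hj => h j (by simp [hj])) b

-- the lookup over a list whose elements are all ≤ the query keeps the last element
theorem pvPrevI_take (i : Int) (a : List Int) (h : ∀ j ∈ a, j ≤ i) : ∀ (b : Int),
    a.foldl (fun best j => if j ≤ i then j else best) b = a.getLastD b := by
  induction a with
  | nil => intro b; simp
  | cons x xs ih =>
    intro b
    have hx : x ≤ i := h x (by simp)
    rw [List.foldl_cons, if_pos hx, List.getLastD_cons]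
    exact ih (fun j hj => h j (by simp [hj])) x

theorem pvPrevI_split (i : Int) (aL aR : List Int)
    (hL : ∀ j ∈ aL, j < i) (hR : ∀ j ∈ aR, i < j) :
    pvPrevI (aL ++ aR) i = aL.getLastD 0 := by
  unfold pvPrevI
  rw [List.foldl_append, pvPrevI_skip i aR hR, pvPrevI_take i aL (fun j hj => le_of_lt (hL j hj))]

-- B's emission pass, against the reference recursion: aL is the consumed prefix of the index
theorem pvEmit (g : Int) (a : List Int) : ∀ (ts : List String) (i c : Int) (aL : List Int),
    a = aL ++ pvIpos ts i → aL.getLastD 0 = c → (∀ j ∈ aL, j < i) →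
    (PySem.List.enumerate ts i).filterMap (fun p =>
      if p.2 == "I" then some []
      else if p.2 == "P" then
        let b := pvPrevI a p.1
        some (PySem.List.pyRange b (b + g) 1)
      else none) = pvOut g ts i c := by
  intro ts
  induction ts with
  | nil => intro i c aL _ _ _; simp [PySem.List.enumerate_nil, pvOut]
  | cons t ts ih =>
    intro i c aL ha hc hlt
    rw [PySem.List.enumerate_cons, List.filterMap_cons]
    by_cases hI : t == "I"
    · have hP : (t == "P") = false := by
        have := eq_of_beq hI; subst this; decide
      have ha' : a = (aL ++ [i]) ++ pvIpos ts (i + 1) := by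
        simp [ha, pvIpos, hI]
      have hc' : (aL ++ [i]).getLastD 0 = i := by
        simp [List.getLastD_eq_getLast?, List.getLast?_append]
      have hlt' : ∀ j ∈ aL ++ [i], j < i + 1 := by
        intro j hj
        rcases List.mem_append.mp hj with h | h
        · have := hlt j h; omega
        · simp at h; omega
      simp only [hI, hP, if_true]
      rw [ih (i + 1) i (aL ++ [i]) ha' hc' hlt']
      simp [pvOut, hI]
    · have ha' : a = aL ++ pvIpos ts (i + 1) := by
        simp [ha, pvIpos, hI]
      have hlt' : ∀ j ∈ aL, j < i + 1 := fun j hj => by have := hlt j hj; omega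
      by_cases hP : t == "P"
      · have hb : pvPrevI a i = c := by
          rw [ha']
          rw [pvPrevI_split i aL (pvIpos ts (i + 1)) hlt
            (fun j hj => by have := pvIpos_ge ts (i + 1) j hj; omega)]
          exact hc
        simp only [hI, hP, if_false, if_true]
        rw [ih (i + 1) c aL ha' hc hlt']
        simp [pvOut, hI, hP, hb]
      · simp only [hI, hP, if_false]
        rw [ih (i + 1) c aL ha' hc hlt']
        simp [pvOut, hI, hP]

-- ===== VERDICT (by name: the statement is the Claim_ definition above) =====
theorem predictors_ip_gop_spec : Claim_equal_predictors_ip_gop := by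
  intro frame_type gop_length _
  unfold Spec_predictors_ip_gop predictors_ip_gop predictors_ip_gop_alt
  rw [pvA_fold, pvIpos_eq]
  simp only [List.nil_append]
  exact (pvEmit gop_length (pvIpos frame_type 0) frame_type 0 0 [] (by simp) rfl
    (by intro j hj; simp at hj)).symm
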